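-- pv_equiv track=rewrite | github.com/yeafla530/algorithms | 프로그래머스/Lv0/배열조각하기.py | solution
-- ===== SOURCE A (Python) =====
-- def solution(arr, query):
--     answer = []
--
--     for i in range(len(query)):
--         n = query[i]
--
--         # 짝수
--         if i % 2 == 0:
--             arr = arr[:n+1]
--         # 홀수
--         else:
--             arr = arr[n:]
--
--
--     return arr
-- ===== SOURCE B (Python) =====
-- # B: track index bounds (lo, hi) into the original array and slice once at the
-- # end, instead of materialising a new list per query.
--
-- def _clamp(L, j):
--     """Normalise a Python slice bound j against window length L."""
--     if j < 0:
--         j += L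
--     return 0 if j < 0 else (L if j > L else j)
--
-- def solution(arr, query):
--     lo, hi = 0, len(arr)
--     for i, n in enumerate(query):
--         if i % 2 == 0:
--             hi = lo + _clamp(hi - lo, n + 1)
--         else:
--             lo = lo + _clamp(hi - lo, n)
--     return arr[lo:hi]
-- ===== Notes on version B (the rewrite author's own statement) =====
-- stated objective: alternative
-- what changed: Instead of building a new sliced list for every query, B keeps (lo, hi) index bounds into the original array, updates them with Python's slice-bound normalisation per query, and slices once at the end.
import Mathlib
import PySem

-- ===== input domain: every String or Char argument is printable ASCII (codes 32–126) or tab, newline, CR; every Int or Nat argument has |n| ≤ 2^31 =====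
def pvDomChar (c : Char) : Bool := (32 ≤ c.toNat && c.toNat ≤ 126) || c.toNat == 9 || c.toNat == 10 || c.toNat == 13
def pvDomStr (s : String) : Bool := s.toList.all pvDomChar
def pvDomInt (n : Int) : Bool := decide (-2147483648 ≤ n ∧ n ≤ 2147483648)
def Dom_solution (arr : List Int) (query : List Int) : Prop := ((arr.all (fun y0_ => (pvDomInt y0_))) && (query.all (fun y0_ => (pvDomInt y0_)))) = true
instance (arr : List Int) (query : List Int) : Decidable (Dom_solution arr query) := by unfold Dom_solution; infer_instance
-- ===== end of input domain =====

-- B keeps (lo, hi) index bounds into the original array and slices once at the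
-- end, instead of materialising a new list per query (objective: alternative).

-- ===== PORT A =====
-- the 'for i in range(len(query))' loop: structural recursion over query carrying the index i
def solAGo (arr : List Int) (i : Nat) : List Int → List Int
  | [] => arr
  | n :: rest =>
    if i % 2 = 0 then
      solAGo (PySem.List.slice arr none (some (n + 1))) (i + 1) rest
    else
      solAGo (PySem.List.slice arr (some n) none) (i + 1) rest

def solution (arr : List Int) (query : List Int) : List Int :=
  solAGo arr 0 query

-- ===== PORT B =====
-- Source B's _clamp: normalise a slice bound j against window length L
def pyClampB (L j : Int) : Int :=
  let j' := if j < 0 then j + L else j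
  if j' < 0 then 0 else if j' > L then L else j'

-- Source B's loop: update the (lo, hi) bounds per query
def solBGo (lo hi : Int) (i : Nat) : List Int → Int × Int
  | [] => (lo, hi)
  | n :: rest =>
    if i % 2 = 0 then
      solBGo lo (lo + pyClampB (hi - lo) (n + 1)) (i + 1) rest
    else
      solBGo (lo + pyClampB (hi - lo) n) hi (i + 1) rest

def solution_alt (arr : List Int) (query : List Int) : List Int :=
  let p := solBGo 0 (PySem.List.len arr) 0 query
  PySem.List.slice arr (some p.1) (some p.2)

-- ===== PRECONDITION & SPEC =====
def Spec_solution (arr : List Int) (query : List Int) (out : List Int) : Prop := out = solution_alt arr query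
instance (arr : List Int) (query : List Int) (out : List Int) : Decidable (Spec_solution arr query out) := by unfold Spec_solution; infer_instance

-- ===== CLAIM (what is proved, stated in full; the proofs are below) =====
def Claim_equal_solution : Prop := ∀ (arr : List Int) (query : List Int), Dom_solution arr query → Spec_solution arr query (solution arr query)

-- ===== LEMMAS AND PROOFS =====

-- Source B's clamp computes exactly PySem's slice-bound normalisation
lemma pyClampB_eq_clampIdx (L : Nat) (j : Int) :
    pyClampB (L : Int) j = ((PySem.List.clampIdx L j : Nat) : Int) := by
  simp only [pyClampB, PySem.List.clampIdx]
  split_ifs <;> omega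

lemma clampIdx_le' (L : Nat) (j : Int) : PySem.List.clampIdx L j ≤ L := by
  simp only [PySem.List.clampIdx]
  split_ifs <;> omega

-- A's even-step slice of the current window, in terms of the original array
lemma slice_window_to (arr : List Int) (lo hi : Nat) (b : Int)
    (h2 : hi ≤ arr.length) :
    PySem.List.slice ((arr.drop lo).take (hi - lo)) none (some b)
      = (arr.drop lo).take (PySem.List.clampIdx (hi - lo) b) := by
  have hlen : ((arr.drop lo).take (hi - lo)).length = hi - lo := by
    simp [List.length_take, List.length_drop]; omega
  simp only [PySem.List.slice, hlen, List.drop_zero, Nat.sub_zero, List.take_take]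
  congr 1
  exact Nat.min_eq_left (clampIdx_le' _ _)

-- A's odd-step slice of the current window, in terms of the original array
lemma slice_window_from (arr : List Int) (lo hi : Nat) (a : Int)
    (h2 : hi ≤ arr.length) :
    PySem.List.slice ((arr.drop lo).take (hi - lo)) (some a) none
      = (arr.drop (lo + PySem.List.clampIdx (hi - lo) a)).take
          (hi - (lo + PySem.List.clampIdx (hi - lo) a)) := by
  have hlen : ((arr.drop lo).take (hi - lo)).length = hi - lo := by
    simp [List.length_take, List.length_drop]; omega
  rw [PySem.List.slice_some_none, hlen, List.drop_take, List.drop_drop]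
  congr 1
  omega

-- B's bound updates keep 0 ≤ lo ≤ hi
lemma pyClampB_bounds (L j : Int) (hL : 0 ≤ L) : 0 ≤ pyClampB L j ∧ pyClampB L j ≤ L := by
  simp only [pyClampB]
  split_ifs <;> omega

lemma solBGo_bounds (q : List Int) : ∀ (lo hi : Int) (i : Nat), 0 ≤ lo → lo ≤ hi →
    0 ≤ (solBGo lo hi i q).1 ∧ (solBGo lo hi i q).1 ≤ (solBGo lo hi i q).2 := by
  induction q with
  | nil => intro lo hi i h1 h2; simpa [solBGo] using ⟨h1, h2⟩
  | cons n rest ih =>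
    intro lo hi i h1 h2
    simp only [solBGo]
    by_cases hp : i % 2 = 0
    · simp only [hp, if_true]
      have hb := pyClampB_bounds (hi - lo) (n + 1) (by omega)
      exact ih lo (lo + pyClampB (hi - lo) (n + 1)) (i + 1) h1 (by omega)
    · simp only [hp, if_false]
      have hb := pyClampB_bounds (hi - lo) n (by omega)
      exact ih (lo + pyClampB (hi - lo) n) hi (i + 1) (by omega) (by omega)

-- main invariant: A's loop on the window equals B's bound updates on the indices
lemma solGo_agree (q : List Int) : ∀ (arr : List Int) (lo hi i : Nat),
    lo ≤ hi → hi ≤ arr.length →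
    solAGo ((arr.drop lo).take (hi - lo)) i q
      = (let p := solBGo (lo : Int) (hi : Int) i q
         (arr.drop p.1.toNat).take (p.2.toNat - p.1.toNat)) := by
  induction q with
  | nil =>
    intro arr lo hi i h1 h2
    simp [solAGo, solBGo]
  | cons n rest ih =>
    intro arr lo hi i h1 h2
    simp only [solAGo, solBGo]
    by_cases hp : i % 2 = 0
    · simp only [hp, if_true]
      set c := PySem.List.clampIdx (hi - lo) (n + 1) with hc
      have hcle : c ≤ hi - lo := clampIdx_le' _ _
      have hcast : (lo : Int) + pyClampB ((hi : Int) - (lo : Int)) (n + 1)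
          = ((lo + c : Nat) : Int) := by
        have : (hi : Int) - (lo : Int) = ((hi - lo : Nat) : Int) := by omega
        rw [this, pyClampB_eq_clampIdx]; push_cast; ring
      rw [slice_window_to arr lo hi (n + 1) h2, hcast]
      have goal := ih arr lo (lo + c) (i + 1) (by omega) (by omega)
      simpa [Nat.add_sub_cancel_left] using goal
    · simp only [hp, if_false]
      set c := PySem.List.clampIdx (hi - lo) n with hc
      have hcle : c ≤ hi - lo := clampIdx_le' _ _
      have hcast : (lo : Int) + pyClampB ((hi : Int) - (lo : Int)) n
          = ((lo + c : Nat) : Int) := by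
        have : (hi : Int) - (lo : Int) = ((hi - lo : Nat) : Int) := by omega
        rw [this, pyClampB_eq_clampIdx]; push_cast; ring
      rw [slice_window_from arr lo hi n h2, hcast]
      exact ih arr (lo + c) hi (i + 1) (by omega) h2

-- ===== VERDICT (by name: the statement is the Claim_ definition above) =====
theorem solution_spec : Claim_equal_solution := by
  intro arr query _
  unfold Spec_solution solution solution_alt
  have h := solGo_agree query arr 0 arr.length 0 (Nat.zero_le _) le_rfl
  simp only [List.drop_zero, Nat.sub_zero, List.take_length] at h
  simp only [PySem.List.len_eq]
  obtain ⟨hb1, hb2⟩ := solBGo_bounds query 0 (arr.length : Int) 0 le_rfl (by positivity)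
  rw [PySem.List.slice_toNat arr hb1 (le_trans hb1 hb2)]
  simpa using h
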